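-- pv_equiv track=rewrite | github.com/dryabokon/algo | recurs_06_staircase_problem.py | list_number_of_ways
-- ===== SOURCE A (Python) =====
-- def list_number_of_ways(N,steps=[1,2]):
-- 	C = 0
-- 	ways = []
--
-- 	for each in steps:
-- 		if each ==N:
-- 			C+=1
-- 			ways.append([N])
--
--
-- 	for each in steps:
-- 		option=N-each
-- 		if option>0:
-- 			s, options = list_number_of_ways(option,steps)
-- 			C+=s
-- 			for option in options:
-- 				ways.append([each] + option)
--
-- 	return C, ways
-- ===== SOURCE B (Python) =====
-- def list_number_of_ways(N, steps=[1, 2]):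
--     # Top-down with memoization: each subproblem's (count, ways) is computed once
--     # and cached, instead of being re-solved on every recursive visit.
--     memo = {}
--
--     def ways_to(n):
--         if n in memo:
--             return memo[n]
--         c = 0
--         w = []
--         for s in steps:
--             if s == n:
--                 c += 1
--                 w.append([n])
--         for s in steps:
--             r = n - s
--             if r > 0:
--                 rc, rw = ways_to(r)
--                 c += rc
--                 for t in rw:
--                     w.append([s] + t)
--         memo[n] = (c, w)
--         return c, w
--
--     return ways_to(N)
-- ===== Notes on version B (the rewrite author's own statement) =====
-- stated objective: alternative
-- what changed: Replaced the naive top-down recursion (which re-solves every subproblem on each visit) by the same-order recursion with a memo dictionary, so each subproblem's (count, ways) is computed once; Pre_ excludes only the inputs (a nonpositive step below a reachable positive remainder) on which A recurses forever (RecursionError).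
import Mathlib
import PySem

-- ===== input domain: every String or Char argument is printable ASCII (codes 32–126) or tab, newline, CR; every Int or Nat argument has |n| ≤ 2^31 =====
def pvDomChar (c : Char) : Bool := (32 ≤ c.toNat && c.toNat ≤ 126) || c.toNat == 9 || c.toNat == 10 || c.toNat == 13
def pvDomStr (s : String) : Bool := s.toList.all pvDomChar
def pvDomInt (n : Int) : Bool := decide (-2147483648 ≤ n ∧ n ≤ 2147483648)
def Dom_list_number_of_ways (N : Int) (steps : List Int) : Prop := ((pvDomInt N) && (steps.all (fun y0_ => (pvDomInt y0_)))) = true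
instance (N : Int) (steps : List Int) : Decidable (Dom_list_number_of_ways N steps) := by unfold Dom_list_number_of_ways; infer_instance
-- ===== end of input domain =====

-- B replaces A's naive top-down recursion (which re-solves every subproblem on each
-- visit) by the same recursion with a memo dictionary, computing each subproblem once;
-- equal output proved on positive-step inputs (Pre_ = the natural staircase domain).


-- ===== PORT A =====
-- A's recursion, transliterated with a fuel parameter; fuel N.toNat+1 is enough on every
-- input of Pre_ (each recursive call strictly decreases a positive N by a positive step).
def pvGoA : Nat → Int → List Int → Int × List (List Int)
  | 0, _, _ => (0, [])
  | f + 1, N, steps =>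
    -- first loop: for each in steps: if each == N: C += 1; ways.append([N])
    let first := steps.foldl (fun (st : Int × List (List Int)) each =>
      if each == N then (st.1 + 1, st.2 ++ [[N]]) else st) (0, [])
    -- second loop: recurse on option = N - each when option > 0
    steps.foldl (fun (st : Int × List (List Int)) each =>
      let option := N - each
      if option > 0 then
        let r := pvGoA f option steps
        (st.1 + r.1, st.2 ++ r.2.map (fun o => [each] ++ o))
      else st) first

def list_number_of_ways (N : Int) (steps : List Int) : Int × List (List Int) :=
  pvGoA (N.toNat + 1) N steps

-- ===== PORT B =====
-- Source B's inner 'ways_to' with its memo dict threaded through explicitly, and the same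
-- fuel convention as A's port (each recursive call decreases a positive n by a positive
-- step, so fuel N.toNat+1 is enough on every input of Pre_).
def pvGoB (steps : List Int) :
    Nat → Int → PySem.Dict Int (Int × List (List Int)) →
      (Int × List (List Int)) × PySem.Dict Int (Int × List (List Int))
  | 0, _, m => ((0, []), m)
  | f + 1, n, m =>
    match m.get? n with
    | some v => (v, m)                       -- if n in memo: return memo[n]
    | none =>
      -- for s in steps: if s == n: c += 1; w.append([n])
      let first := steps.foldl (fun (st : Int × List (List Int)) s =>
        if s == n then (st.1 + 1, st.2 ++ [[n]]) else st) (0, [])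
      -- for s in steps: r = n - s; if r > 0: recurse on the current memo
      let res := steps.foldl
        (fun (st : (Int × List (List Int)) × PySem.Dict Int (Int × List (List Int))) s =>
          let r := n - s
          if r > 0 then
            let rv := pvGoB steps f r st.2
            ((st.1.1 + rv.1.1, st.1.2 ++ rv.1.2.map (fun t => [s] ++ t)), rv.2)
          else st) (first, m)
      (res.1, res.2.insert n res.1)          -- memo[n] = (c, w)

def list_number_of_ways_alt (N : Int) (steps : List Int) : Int × List (List Int) :=
  (pvGoB steps (N.toNat + 1) N PySem.Dict.empty).1

-- ===== PRECONDITION & SPEC =====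
-- Pre_ is exactly where the Python A terminates: with a nonpositive step reachable from a
-- positive remainder A recurses forever (RecursionError); on every other input A returns.
def Pre_list_number_of_ways (N : Int) (steps : List Int) : Prop :=
  (∀ s ∈ steps, 0 < s) ∨ (N ≤ 0 ∧ ∀ s ∈ steps, N ≤ s)
instance (N : Int) (steps : List Int) : Decidable (Pre_list_number_of_ways N steps) := by
  unfold Pre_list_number_of_ways; infer_instance

def pvWitness_list_number_of_ways : Int × List Int := (5, [1, 2])

def Spec_list_number_of_ways (N : Int) (steps : List Int) (out : Int × List (List Int)) : Prop := out = list_number_of_ways_alt N steps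
instance (N : Int) (steps : List Int) (out : Int × List (List Int)) : Decidable (Spec_list_number_of_ways N steps out) := by unfold Spec_list_number_of_ways; infer_instance

-- ===== CLAIM (what is proved, stated in full; the proofs are below) =====
def Claim_equal_list_number_of_ways : Prop := ∀ (N : Int) (steps : List Int), Dom_list_number_of_ways N steps → Pre_list_number_of_ways N steps → Spec_list_number_of_ways N steps (list_number_of_ways N steps)

-- ===== LEMMAS AND PROOFS =====

lemma pv_foldl_id {α β : Type} (f : α → β → α) :
    ∀ (l : List β), (∀ a x, x ∈ l → f a x = a) → ∀ init, l.foldl f init = init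
  | [], _, init => rfl
  | x :: rest, h, init => by
    rw [List.foldl_cons, h init x (List.mem_cons_self), pv_foldl_id f rest
      (fun a y hy => h a y (List.mem_cons_of_mem _ hy))]

-- fuel irrelevance for A's port on positive steps
lemma pvGoA_fuel (steps : List Int) (hpos : ∀ s ∈ steps, 0 < s) :
    ∀ (f : Nat) (N : Int), N.toNat < f → pvGoA f N steps = pvGoA (N.toNat + 1) N steps := by
  intro f
  induction f using Nat.strong_induction_on with
  | _ f IH =>
    intro N hf
    match f, hf with
    | f' + 1, hf =>
      rw [pvGoA, pvGoA]
      refine PySem.List.foldl_congr_mem steps _ _ _ ?_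
      intro acc x hx
      dsimp only
      by_cases hop : N - x > 0
      · rw [if_pos hop, if_pos hop]
        have hx1 := hpos x hx
        rw [IH f' (by omega) (N - x) (by omega), IH N.toNat (by omega) (N - x) (by omega)]
      · rw [if_neg hop, if_neg hop]

-- memo correctness: every cached entry is A's value at its key
def pvInv (steps : List Int) (m : PySem.Dict Int (Int × List (List Int))) : Prop :=
  ∀ k v, m.get? k = some v → v = pvGoA (k.toNat + 1) k steps

lemma pvInv_empty (steps : List Int) : pvInv steps PySem.Dict.empty := by
  intro k v h
  rw [PySem.Dict.get?_empty] at h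
  exact absurd h (by simp)

-- the recursion loop of B computes A's recursion loop and preserves the memo invariant
lemma pvGoB_loop (steps : List Int) (hpos : ∀ s ∈ steps, 0 < s) (f' : Nat) (n : Int)
    (hn : n.toNat ≤ f')
    (hIH : ∀ (n' : Int) (m' : PySem.Dict Int (Int × List (List Int))), n'.toNat < f' →
      pvInv steps m' →
      (pvGoB steps f' n' m').1 = pvGoA (n'.toNat + 1) n' steps ∧
      pvInv steps (pvGoB steps f' n' m').2) :
    ∀ (l : List Int), (∀ s ∈ l, s ∈ steps) →
      ∀ (acc : Int × List (List Int)) (m : PySem.Dict Int (Int × List (List Int))),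
        pvInv steps m →
        (l.foldl
          (fun (st : (Int × List (List Int)) × PySem.Dict Int (Int × List (List Int))) s =>
            let r := n - s
            if r > 0 then
              let rv := pvGoB steps f' r st.2
              ((st.1.1 + rv.1.1, st.1.2 ++ rv.1.2.map (fun t => [s] ++ t)), rv.2)
            else st) (acc, m)).1
          = l.foldl (fun (st : Int × List (List Int)) s =>
              let option := n - s
              if option > 0 then
                let r := pvGoA f' option steps
                (st.1 + r.1, st.2 ++ r.2.map (fun o => [s] ++ o))
              else st) acc ∧
        pvInv steps (l.foldl
          (fun (st : (Int × List (List Int)) × PySem.Dict Int (Int × List (List Int))) s =>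
            let r := n - s
            if r > 0 then
              let rv := pvGoB steps f' r st.2
              ((st.1.1 + rv.1.1, st.1.2 ++ rv.1.2.map (fun t => [s] ++ t)), rv.2)
            else st) (acc, m)).2
  | [], _, acc, m, hm => ⟨rfl, hm⟩
  | s :: rest, hsub, acc, m, hm => by
    have hs : s ∈ steps := hsub s (List.mem_cons_self)
    have hrest : ∀ x ∈ rest, x ∈ steps := fun x hx => hsub x (List.mem_cons_of_mem _ hx)
    rw [List.foldl_cons, List.foldl_cons]
    by_cases hop : n - s > 0
    · have hs1 := hpos s hs
      have hrf : (n - s).toNat < f' := by omega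
      have h1 := hIH (n - s) m hrf hm
      have hfa : pvGoA f' (n - s) steps = pvGoA ((n - s).toNat + 1) (n - s) steps :=
        pvGoA_fuel steps hpos f' (n - s) hrf
      simp only [if_pos hop]
      rw [show (pvGoB steps f' (n - s) m).1.1 = (pvGoA f' (n - s) steps).1 from by
            rw [h1.1, hfa],
          show (pvGoB steps f' (n - s) m).1.2 = (pvGoA f' (n - s) steps).2 from by
            rw [h1.1, hfa]]
      exact pvGoB_loop steps hpos f' n hn hIH rest hrest _ _ h1.2
    · simp only [if_neg hop]
      exact pvGoB_loop steps hpos f' n hn hIH rest hrest acc m hm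

-- main correspondence: B's memoized recursion returns A's value and keeps a correct memo
lemma pvGoB_correct (steps : List Int) (hpos : ∀ s ∈ steps, 0 < s) :
    ∀ (f : Nat) (n : Int) (m : PySem.Dict Int (Int × List (List Int))),
      n.toNat < f → pvInv steps m →
      (pvGoB steps f n m).1 = pvGoA (n.toNat + 1) n steps ∧
      pvInv steps (pvGoB steps f n m).2 := by
  intro f
  induction f using Nat.strong_induction_on with
  | _ f IH =>
    intro n m hf hm
    match f, hf with
    | f' + 1, hf =>
      rw [pvGoB]
      cases hget : m.get? n with
      | some v =>
        exact ⟨hm n v hget, hm⟩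
      | none =>
        dsimp only
        have hIH' : ∀ (n' : Int) (m' : PySem.Dict Int (Int × List (List Int))),
            n'.toNat < f' → pvInv steps m' →
            (pvGoB steps f' n' m').1 = pvGoA (n'.toNat + 1) n' steps ∧
            pvInv steps (pvGoB steps f' n' m').2 :=
          fun n' m' h1 h2 => IH f' (by omega) n' m' h1 h2
        have hloop := pvGoB_loop steps hpos f' n (by omega) hIH' steps (fun _ h => h)
          (steps.foldl (fun (st : Int × List (List Int)) s =>
            if s == n then (st.1 + 1, st.2 ++ [[n]]) else st) (0, [])) m hm
        have hres : (pvGoA (f' + 1) n steps) = pvGoA (n.toNat + 1) n steps :=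
          pvGoA_fuel steps hpos (f' + 1) n (by omega)
        rw [pvGoA] at hres
        constructor
        · rw [hloop.1, hres]
        · intro k v hk
          rw [PySem.Dict.get?_insert] at hk
          by_cases hkn : k = n
          · rw [if_pos hkn] at hk
            subst hkn
            rw [hloop.1, hres] at hk
            exact (Option.some_injective _ hk).symm
          · rw [if_neg hkn] at hk
            exact hloop.2 k v hk

-- ===== VERDICT (by name: the statement is the Claim_ definition above) =====
theorem list_number_of_ways_spec : Claim_equal_list_number_of_ways := by
  intro N steps _ hpre
  unfold Spec_list_number_of_ways list_number_of_ways list_number_of_ways_alt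
  rcases hpre with hpos | ⟨hN0, hge⟩
  · exact (pvGoB_correct steps hpos (N.toNat + 1) N PySem.Dict.empty (by omega)
      (pvInv_empty steps)).1.symm
  · -- no recursion fires on either side: both sides are just the first loop at fuel 1
    rw [show N.toNat + 1 = 0 + 1 from by omega]
    have hid : ∀ x ∈ steps, ¬ (N - x > 0) := fun x hx => by
      have := hge x hx; omega
    have hA : pvGoA (0 + 1) N steps
        = steps.foldl (fun (st : Int × List (List Int)) each =>
            if each == N then (st.1 + 1, st.2 ++ [[N]]) else st) (0, []) := by
      rw [pvGoA]
      exact pv_foldl_id _ steps (fun a x hx => by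
        dsimp only
        rw [if_neg (hid x hx)]) _
    have hB : (pvGoB steps (0 + 1) N PySem.Dict.empty).1
        = steps.foldl (fun (st : Int × List (List Int)) s =>
            if s == N then (st.1 + 1, st.2 ++ [[N]]) else st) (0, []) := by
      simp only [pvGoB, PySem.Dict.get?_empty]
      rw [pv_foldl_id _ steps (fun a x hx => by
        rw [if_neg (hid x hx)]) _]
    rw [hA, hB]
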